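-- pv_equiv track=rewrite | github.com/Kilgore-Devs/MorePython | Basics/level 8/A wolf in sheep's clothing.py | warn_the_sheep
-- ===== SOURCE A (Python) =====
-- def warn_the_sheep(queue):
--     queue = queue[::-1]  # reverse a list
--     p = 'Pls go away and stop eating my sheep'
--     s = None
--
--     for i, animal in enumerate(queue):  # if animal is equal to wolf, take the in ex number and assign it to s
--         if animal == 'wolf':
--             s = i
--
--     if s == 0:
--         return p
--     else:
--         return f"Oi! Sheep number {s}! You are about to be eaten by a wolf!"
-- ===== SOURCE B (Python) =====
-- def warn_the_sheep(queue):
--     # Forward pass with a counter: once the first wolf is seen, count the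
--     # animals that come after it; no reversal, no indices.
--     s = None
--     for animal in queue:
--         if s is not None:
--             s += 1
--         elif animal == 'wolf':
--             s = 0
--     if s == 0:
--         return 'Pls go away and stop eating my sheep'
--     return f"Oi! Sheep number {s}! You are about to be eaten by a wolf!"
-- ===== Notes on version B (the rewrite author's own statement) =====
-- stated objective: simpler
-- what changed: B replaces A's list reversal and enumerate loop that records the index of the last wolf in the reversed list by a single forward pass with a counter: once the first wolf is seen it starts counting the animals that follow it, so the maintained state is a running count from the wolf, not a position in a reversed copy.
import Mathlib
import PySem

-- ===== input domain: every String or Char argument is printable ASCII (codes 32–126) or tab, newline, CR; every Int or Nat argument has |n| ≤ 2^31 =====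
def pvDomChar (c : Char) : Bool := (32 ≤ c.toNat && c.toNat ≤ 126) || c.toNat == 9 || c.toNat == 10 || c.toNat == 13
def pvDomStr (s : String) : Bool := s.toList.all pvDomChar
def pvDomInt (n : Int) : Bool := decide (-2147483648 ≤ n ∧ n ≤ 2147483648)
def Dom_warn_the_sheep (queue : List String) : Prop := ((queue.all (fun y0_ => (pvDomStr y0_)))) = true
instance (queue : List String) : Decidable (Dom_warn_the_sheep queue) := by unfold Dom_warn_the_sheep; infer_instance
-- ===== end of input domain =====

-- B replaces A's reversal + enumerate loop (index of the last wolf in the reversed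
-- copy) by one forward pass counting the animals after the first wolf; objective: simpler.

-- ===== PORT A =====
-- queue = queue[::-1]; loop over enumerate keeping the index of the LAST 'wolf'
def warn_the_sheep (queue : List String) : String :=
  let q : List String := (PySem.List.slice? queue none none (-1)).getD []
  let p : String := "Pls go away and stop eating my sheep"
  let s : Option Int :=
    (PySem.List.enumerate q 0).foldl
      (fun s ia => if ia.2 = "wolf" then some ia.1 else s) none
  if s = some 0 then p
  else "Oi! Sheep number " ++
       (match s with | none => "None" | some n => PySem.Int.toStr n) ++
       "! You are about to be eaten by a wolf!"

-- ===== PORT B =====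
-- forward pass: s = None; for animal in queue: if s is not None: s += 1
--               elif animal == 'wolf': s = 0
def warn_the_sheep_alt (queue : List String) : String :=
  let s : Option Int :=
    queue.foldl
      (fun s animal =>
        match s with
        | some k => some (k + 1)
        | none => if animal = "wolf" then some 0 else none) none
  if s = some 0 then "Pls go away and stop eating my sheep"
  else "Oi! Sheep number " ++
       (match s with | none => "None" | some n => PySem.Int.toStr n) ++
       "! You are about to be eaten by a wolf!"

-- ===== PRECONDITION & SPEC =====
def Spec_warn_the_sheep (queue : List String) (out : String) : Prop := out = warn_the_sheep_alt queue
instance (queue : List String) (out : String) : Decidable (Spec_warn_the_sheep queue out) := by unfold Spec_warn_the_sheep; infer_instance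

-- ===== CLAIM (what is proved, stated in full; the proofs are below) =====
def Claim_equal_warn_the_sheep : Prop := ∀ (queue : List String), Dom_warn_the_sheep queue → Spec_warn_the_sheep queue (warn_the_sheep queue)

-- ===== LEMMAS AND PROOFS =====

-- A's loop over the reversed list keeps the LAST 'wolf' of the reversed list,
-- i.e. the FIRST 'wolf' of the original list, at reversed position len - 1 - i.
theorem lastwolf (xs : List String) (acc : Option Int) :
    (PySem.List.enumerate xs.reverse 0).foldl
        (fun s ia => if ia.2 = "wolf" then some ia.1 else s) acc
      = match PySem.List.index? xs "wolf" with
        | some i => some ((xs.length : Int) - (i : Int) - 1)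
        | none => acc := by
  induction xs generalizing acc with
  | nil => simp [List.idxOf?]
  | cons a t ih =>
    rw [List.reverse_cons, PySem.List.enumerate_append, List.foldl_append, ih]
    simp only [PySem.List.index?_eq_idxOf?, List.idxOf?_cons, PySem.List.enumerate_cons,
      PySem.List.enumerate_nil, List.foldl_cons, List.foldl_nil, List.length_reverse]
    by_cases ha : a = "wolf"
    · subst ha
      cases h : List.idxOf? "wolf" t <;> simp
    · cases h : List.idxOf? "wolf" t with
      | none => simp [beq_iff_eq, ha]
      | some i =>
          simp only [beq_iff_eq, if_neg ha, List.length_cons]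
          congr 1
          push_cast
          ring

-- once started, B's counter just adds the number of remaining elements
theorem bfold_some (xs : List String) (k : Int) :
    xs.foldl
        (fun s animal =>
          match s with
          | some k => some (k + 1)
          | none => if animal = "wolf" then some 0 else none) (some k : Option Int)
      = some (k + xs.length) := by
  induction xs generalizing k with
  | nil => simp
  | cons a t ih =>
    simp only [List.foldl_cons]
    rw [ih]
    congr 1
    push_cast [List.length_cons]
    ring

-- B's forward counting pass computes the distance of the FIRST wolf from the back
theorem bfold_none (xs : List String) :
    xs.foldl
        (fun s animal =>
          match s with
          | some k => some (k + 1)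
          | none => if animal = "wolf" then some 0 else none) (none : Option Int)
      = match PySem.List.index? xs "wolf" with
        | some i => some ((xs.length : Int) - (i : Int) - 1)
        | none => none := by
  induction xs with
  | nil => simp [List.idxOf?]
  | cons a t ih =>
    simp only [List.foldl_cons, PySem.List.index?_eq_idxOf?, List.idxOf?_cons]
    by_cases ha : a = "wolf"
    · subst ha
      simp only [beq_self_eq_true, if_pos]
      rw [bfold_some]
      congr 1
      push_cast [List.length_cons]
      ring
    · simp only [beq_iff_eq, if_neg ha, ih, PySem.List.index?_eq_idxOf?]
      cases h : List.idxOf? "wolf" t with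
      | none => simp
      | some i =>
          simp only [Option.map_some]
          congr 1
          push_cast [List.length_cons]
          ring

-- ===== VERDICT (by name: the statement is the Claim_ definition above) =====
theorem warn_the_sheep_spec : Claim_equal_warn_the_sheep := by
  intro queue _
  unfold Spec_warn_the_sheep warn_the_sheep warn_the_sheep_alt
  rw [PySem.List.slice?_none_none_neg_one]
  simp only [Option.getD_some]
  rw [lastwolf, bfold_none]
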